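-- pv_equiv track=rewrite | github.com/KaleBhaskaraSrinivas/owlcoder | killing spree.py | killinSpree
-- ===== SOURCE A (Python) =====
-- def killinSpree (n):
--     lo=1
--     hi=n
--     while lo<hi:
--         mid=(lo+hi+1)>>1
--         count=mid*(mid+1)*(2*mid+1)//6
--         if count>n:
--             hi=mid-1
--         else:
--             lo=mid
--     return lo
-- ===== SOURCE B (Python) =====
-- def killinSpree(n):
--     m = 1
--     while (m + 1) * (m + 2) * (2 * m + 3) // 6 <= n:
--         m += 1
--     return m
-- ===== Notes on version B (the rewrite author's own statement) =====
-- stated objective: simpler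
-- what changed: Replaces the binary search over the answer range with a linear incremental scan that advances a counter while the next prefix sum of squares still fits in n.
import Mathlib
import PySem

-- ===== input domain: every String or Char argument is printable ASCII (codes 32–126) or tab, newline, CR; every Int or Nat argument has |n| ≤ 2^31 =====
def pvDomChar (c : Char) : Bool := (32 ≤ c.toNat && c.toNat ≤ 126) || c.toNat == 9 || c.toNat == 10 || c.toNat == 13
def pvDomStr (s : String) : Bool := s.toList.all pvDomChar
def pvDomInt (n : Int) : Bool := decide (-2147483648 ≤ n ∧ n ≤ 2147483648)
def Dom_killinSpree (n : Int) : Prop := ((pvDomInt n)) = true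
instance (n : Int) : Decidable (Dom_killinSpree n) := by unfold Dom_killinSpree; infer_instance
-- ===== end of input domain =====

-- B replaces A's binary search by a linear incremental scan from m = 1 (simpler; same return value).


-- ===== PORT A =====
-- midpoint bounds, needed for the loop's termination proof
theorem pvMidBounds {lo hi : Int} (h : lo < hi) :
    lo + 1 ≤ PySem.Int.floordiv (lo + hi + 1) 2 ∧ PySem.Int.floordiv (lo + hi + 1) 2 ≤ hi := by
  rw [PySem.Int.floordiv_eq_ediv_of_pos (by omega)]
  omega

-- the while loop of A; 'mid = (lo+hi+1) >> 1' is floor division by 2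
def killinSpreeLoop (n lo hi : Int) : Int :=
  if h : lo < hi then
    let mid := PySem.Int.floordiv (lo + hi + 1) 2
    let count := PySem.Int.floordiv (mid * (mid + 1) * (2 * mid + 1)) 6
    if count > n then killinSpreeLoop n lo (mid - 1) else killinSpreeLoop n mid hi
  else lo
termination_by (hi - lo).toNat
decreasing_by
  · have := pvMidBounds h; omega
  · have := pvMidBounds h; omega

def killinSpree (n : Int) : Int := killinSpreeLoop n 1 n

-- ===== PORT B =====
-- B's while loop; fuel n.toNat only makes the recursion total: the loop runs at
-- most n - 1 times (each step needs (m+1)(m+2)(2m+3)//6 ≤ n, hence m + 1 ≤ n; proved below)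
def killinSpreeAltLoop (n : Int) : Nat → Int → Int
  | 0, m => m
  | fuel + 1, m =>
      if PySem.Int.floordiv ((m + 1) * (m + 2) * (2 * m + 3)) 6 ≤ n then
        killinSpreeAltLoop n fuel (m + 1)
      else m

def killinSpree_alt (n : Int) : Int := killinSpreeAltLoop n n.toNat 1

-- ===== PRECONDITION & SPEC =====
def Spec_killinSpree (n : Int) (out : Int) : Prop := out = killinSpree_alt n
instance (n : Int) (out : Int) : Decidable (Spec_killinSpree n out) := by unfold Spec_killinSpree; infer_instance

-- ===== CLAIM (what is proved, stated in full; the proofs are below) =====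
def Claim_equal_killinSpree : Prop := ∀ (n : Int), Dom_killinSpree n → Spec_killinSpree n (killinSpree n)

-- ===== LEMMAS AND PROOFS =====
-- abbreviation used by the proofs only: sum of the first k squares, as both programs compute it
def ssum (k : Int) : Int := PySem.Int.floordiv (k * (k + 1) * (2 * k + 1)) 6

theorem ssum_mono {a b : Int} (ha : 1 ≤ a) (hab : a ≤ b) : ssum a ≤ ssum b := by
  unfold ssum
  rw [PySem.Int.floordiv_eq_ediv_of_pos (by norm_num),
      PySem.Int.floordiv_eq_ediv_of_pos (by norm_num)]
  refine Int.ediv_le_ediv (by norm_num) ?_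
  have h2 : a * a ≤ b * b := mul_le_mul hab hab (by omega) (by omega)
  have h3 : a * a * a ≤ b * b * b := by nlinarith
  nlinarith [h2, h3]

theorem ssum_ge {a : Int} (ha : 1 ≤ a) : a ≤ ssum a := by
  unfold ssum
  rw [PySem.Int.floordiv_eq_ediv_of_pos (by norm_num)]
  have h6 : (6 * a) / 6 = a := Int.mul_ediv_cancel_left a (by norm_num)
  calc a = (6 * a) / 6 := h6.symm
    _ ≤ a * (a + 1) * (2 * a + 1) / 6 := Int.ediv_le_ediv (by norm_num) (by
        nlinarith [mul_nonneg (mul_nonneg (by omega : (0:Int) ≤ a) (by omega : (0:Int) ≤ 2 * a + 5)) (by omega : (0:Int) ≤ a - 1)])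

-- the unique m with 1 ≤ m, ssum m ≤ n < ssum (m+1)
theorem ssum_uniq {n a b : Int} (ha : 1 ≤ a) (hb : 1 ≤ b)
    (ha1 : ssum a ≤ n) (ha2 : n < ssum (a + 1))
    (hb1 : ssum b ≤ n) (hb2 : n < ssum (b + 1)) : a = b := by
  rcases lt_trichotomy a b with h | h | h
  · have := ssum_mono (by omega : (1:Int) ≤ a + 1) (by omega : a + 1 ≤ b); omega
  · exact h
  · have := ssum_mono (by omega : (1:Int) ≤ b + 1) (by omega : b + 1 ≤ a); omega

theorem aloop_spec (n : Int) : ∀ (k : Nat) (lo hi : Int), (hi - lo).toNat ≤ k →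
    1 ≤ lo → lo ≤ hi → ssum lo ≤ n → n < ssum (hi + 1) →
    1 ≤ killinSpreeLoop n lo hi ∧ ssum (killinSpreeLoop n lo hi) ≤ n ∧
      n < ssum (killinSpreeLoop n lo hi + 1) := by
  intro k
  induction k with
  | zero =>
    intro lo hi hk h1 hlh hlo hhi
    have heq : hi = lo := by omega
    rw [killinSpreeLoop]
    simp only [show ¬ lo < hi by omega, dif_neg, not_false_iff]
    subst heq
    exact ⟨h1, hlo, hhi⟩
  | succ k ih =>
    intro lo hi hk h1 hlh hlo hhi
    by_cases hlt : lo < hi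
    · rw [killinSpreeLoop]
      simp only [dif_pos hlt]
      have hmid := pvMidBounds hlt
      set mid := PySem.Int.floordiv (lo + hi + 1) 2 with hm
      have hcount : PySem.Int.floordiv (mid * (mid + 1) * (2 * mid + 1)) 6 = ssum mid := rfl
      rw [hcount]
      by_cases hgt : ssum mid > n
      · simp only [if_pos hgt]
        exact ih lo (mid - 1) (by omega) h1 (by omega) hlo (by
          have : mid - 1 + 1 = mid := by ring
          rw [this]; exact hgt)
      · simp only [if_neg hgt]
        exact ih mid hi (by omega) (by omega) (by omega) (by omega) hhi
    · rw [killinSpreeLoop]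
      simp only [dif_neg hlt]
      have heq : hi = lo := by omega
      subst heq
      exact ⟨h1, hlo, hhi⟩

theorem bguard (m : Int) :
    PySem.Int.floordiv ((m + 1) * (m + 2) * (2 * m + 3)) 6 = ssum (m + 1) := by
  unfold ssum; congr 1; ring

theorem bloop_spec (n : Int) : ∀ (fuel : Nat) (m : Int), 1 ≤ m → ssum m ≤ n →
    (n - m).toNat ≤ fuel →
    1 ≤ killinSpreeAltLoop n fuel m ∧ ssum (killinSpreeAltLoop n fuel m) ≤ n ∧
      n < ssum (killinSpreeAltLoop n fuel m + 1) := by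
  intro fuel
  induction fuel with
  | zero =>
    intro m h1 hle hf
    have hnm : n ≤ m := by omega
    have := ssum_ge (a := m + 1) (by omega)
    exact ⟨h1, hle, by simpa [killinSpreeAltLoop] using by omega⟩
  | succ fuel ih =>
    intro m h1 hle hf
    rw [killinSpreeAltLoop, bguard]
    by_cases hg : ssum (m + 1) ≤ n
    · simp only [if_pos hg]
      have hmn : m + 1 ≤ n := le_trans (ssum_ge (by omega)) hg
      exact ih (m + 1) (by omega) hg (by omega)
    · simp only [if_neg hg]
      exact ⟨h1, hle, by omega⟩

theorem ssum_one : ssum 1 = 1 := by decide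

-- ===== VERDICT (by name: the statement is the Claim_ definition above) =====
theorem killinSpree_spec : Claim_equal_killinSpree := by
  intro n _
  unfold Spec_killinSpree killinSpree killinSpree_alt
  by_cases h1 : 1 ≤ n
  · have hA := aloop_spec n (n - 1).toNat 1 n (by omega) (by omega) h1
      (by rw [ssum_one]; exact h1)
      (by have := ssum_ge (a := n + 1) (by omega); omega)
    have hB := bloop_spec n n.toNat 1 (by omega) (by rw [ssum_one]; exact h1) (by omega)
    exact ssum_uniq hA.1 hB.1 hA.2.1 hA.2.2 hB.2.1 hB.2.2
  · have h0 : n.toNat = 0 := by omega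
    rw [killinSpreeLoop, h0]
    simp [show ¬ (1:Int) < n by omega, killinSpreeAltLoop]
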